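-- pv_equiv track=rewrite | github.com/pypi-data/pypi-mirror-401 | packages/bpkio-cli/bpkio_cli-3.1.0-py3-none-any.whl/bpkio_cli/writers/urls.py | split_url
-- ===== SOURCE A (Python) =====
-- def split_url(url):
--     """Splits the URL on common dividers, into segments starting with those dividers"""
--     # dividers = ["/", ".", "-", "_", "?", "&"]
--     dividers = ["/", "?", "&"]
--
--     parts = []
--     current_part = ""
--     for char in url:
--         if char in dividers:
--             if current_part:
--                 parts.append(current_part)
--                 current_part = ""
--             current_part = char
--         else:
--             current_part += char
--     if current_part:
--         parts.append(current_part)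
--     return parts
-- ===== SOURCE B (Python) =====
-- def split_url(url):
--     """Splits the URL on common dividers, into segments starting with those dividers"""
--     dividers = "/?&"
--     parts = []
--     i = 0
--     n = len(url)
--     while i < n:
--         j = i + 1 if url[i] in dividers else i
--         while j < n and url[j] not in dividers:
--             j += 1
--         parts.append(url[i:j])
--         i = j
--     return parts
-- ===== Notes on version B (the rewrite author's own statement) =====
-- stated objective: alternative
-- what changed: Replaced the char-by-char accumulator loop with an index-jumping scanner that slices out each segment (a divider plus its trailing non-divider run, or the leading non-divider run) in one step, keeping no current-part state.
import Mathlib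
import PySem

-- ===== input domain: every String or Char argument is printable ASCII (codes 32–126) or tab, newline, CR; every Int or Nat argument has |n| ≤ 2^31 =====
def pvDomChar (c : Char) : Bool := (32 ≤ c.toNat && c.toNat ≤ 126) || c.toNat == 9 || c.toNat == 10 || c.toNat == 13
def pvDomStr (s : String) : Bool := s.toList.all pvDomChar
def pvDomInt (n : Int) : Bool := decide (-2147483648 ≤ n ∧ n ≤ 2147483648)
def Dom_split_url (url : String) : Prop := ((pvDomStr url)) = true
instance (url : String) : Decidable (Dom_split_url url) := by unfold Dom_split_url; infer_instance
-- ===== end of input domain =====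

-- B replaces A's char-by-char accumulator loop with an index-jumping scanner that
-- slices out whole segments; same O(n) cost, different structure (objective: alternative).

def pvIsDiv (c : Char) : Bool := c == '/' || c == '?' || c == '&'

-- ===== PORT A =====
-- A's loop over the characters, carrying (parts, current_part); strings as List Char.
def splitGoA : List Char → List (List Char) → List Char → List (List Char)
  | [], parts, cur => if cur.isEmpty then parts else parts ++ [cur]
  | c :: cs, parts, cur =>
    if pvIsDiv c then
      splitGoA cs (if cur.isEmpty then parts else parts ++ [cur]) [c]
    else
      splitGoA cs parts (cur ++ [c])

def split_url (url : String) : List String :=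
  (splitGoA url.toList [] []).map String.mk

-- ===== PORT B =====
-- B's outer while loop: each iteration emits one whole segment starting at index i.
-- The inner `while j < n and url[j] not in dividers` scan is the takeWhile/dropWhile below.
def splitGoB : List Char → List (List Char)
  | [] => []
  | c :: cs =>
    match h : pvIsDiv c with
    | true =>
      (c :: cs.takeWhile (fun d => !pvIsDiv d)) :: splitGoB (cs.dropWhile (fun d => !pvIsDiv d))
    | false =>
      ((c :: cs).takeWhile (fun d => !pvIsDiv d)) :: splitGoB ((c :: cs).dropWhile (fun d => !pvIsDiv d))
  termination_by l => l.length
  decreasing_by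
  · simpa using Nat.lt_succ_of_le (List.length_dropWhile_le (fun d => !pvIsDiv d) cs)
  · simp only [List.dropWhile_cons, h, Bool.not_false, if_true]
    simpa using Nat.lt_succ_of_le (List.length_dropWhile_le (fun d => !pvIsDiv d) cs)

def split_url_alt (url : String) : List String :=
  (splitGoB url.toList).map String.mk

-- ===== PRECONDITION & SPEC =====
def Spec_split_url (url : String) (out : List String) : Prop := out = split_url_alt url
instance (url : String) (out : List String) : Decidable (Spec_split_url url out) := by unfold Spec_split_url; infer_instance

-- ===== CLAIM (what is proved, stated in full; the proofs are below) =====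
def Claim_equal_split_url : Prop := ∀ (url : String), Dom_split_url url → Spec_split_url url (split_url url)

-- ===== LEMMAS AND PROOFS =====

lemma splitGoA_append (cs : List Char) (p q : List (List Char)) (cur : List Char) :
    splitGoA cs (p ++ q) cur = p ++ splitGoA cs q cur := by
  induction cs generalizing q cur with
  | nil => simp [splitGoA]; split <;> simp
  | cons c cs ih =>
    simp only [splitGoA]
    split
    · split
      · rw [ih]
      · rw [List.append_assoc, ih]
    · rw [ih]

lemma splitGoB_cons_div (c : Char) (cs : List Char) (h : pvIsDiv c = true) :
    splitGoB (c :: cs) =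
      (c :: cs.takeWhile (fun d => !pvIsDiv d)) ::
        splitGoB (cs.dropWhile (fun d => !pvIsDiv d)) := by
  rw [splitGoB]
  split <;> simp_all

lemma splitGoB_cons_nondiv (c : Char) (cs : List Char) (h : pvIsDiv c = false) :
    splitGoB (c :: cs) =
      ((c :: cs).takeWhile (fun d => !pvIsDiv d)) ::
        splitGoB ((c :: cs).dropWhile (fun d => !pvIsDiv d)) := by
  rw [splitGoB]
  split <;> simp_all

lemma splitGoA_eq_goB (cs : List Char) (cur : List Char) :
    splitGoA cs [] cur =
      (if cur.isEmpty then splitGoB cs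
       else (cur ++ cs.takeWhile (fun d => !pvIsDiv d)) ::
            splitGoB (cs.dropWhile (fun d => !pvIsDiv d))) := by
  induction cs generalizing cur with
  | nil => cases hc : cur.isEmpty <;> simp [splitGoA, splitGoB, hc]
  | cons c cs ih =>
    cases hd : pvIsDiv c <;> cases hc : cur.isEmpty
    · -- c not a divider, cur ≠ []
      simp only [splitGoA, hd, Bool.false_eq_true, if_false, hc]
      rw [ih]
      simp [hd, List.takeWhile_cons, List.dropWhile_cons]
    · -- c not a divider, cur = []
      have hcur : cur = [] := by simpa using hc
      subst hcur
      simp only [splitGoA, hd, Bool.false_eq_true, if_false, List.isEmpty_nil, if_true,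
        List.nil_append]
      rw [ih, splitGoB_cons_nondiv c cs hd]
      simp [hd, List.takeWhile_cons, List.dropWhile_cons]
    · -- c a divider, cur ≠ []
      simp only [splitGoA, hd, if_true, hc, Bool.false_eq_true, if_false]
      rw [show ([] : List (List Char)) ++ [cur] = [cur] ++ [] by simp,
        splitGoA_append cs [cur] [] [c], ih]
      simp only [List.takeWhile_cons, List.dropWhile_cons, hd, Bool.not_true,
        Bool.false_eq_true, if_false]
      rw [splitGoB_cons_div c cs hd]
      simp
    · -- c a divider, cur = []
      have hcur : cur = [] := by simpa using hc
      subst hcur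
      simp only [splitGoA, hd, if_true, List.isEmpty_nil]
      rw [ih, splitGoB_cons_div c cs hd]
      simp

-- ===== VERDICT (by name: the statement is the Claim_ definition above) =====
theorem split_url_spec : Claim_equal_split_url := by
  intro url _
  unfold Spec_split_url split_url split_url_alt
  rw [splitGoA_eq_goB]
  simp
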